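-- pv_equiv track=rewrite | github.com/prakhardogra921/Movie-Pair-Analysis-using-Hadoop-and-Spark | SourceCode/Spark Stripes.py | map1
-- ===== SOURCE A (Python) =====
-- def map1(movie_list):
--     list = []
--     movie_dict = {}
--     l = len(movie_list)
--     movie_list = map(int, movie_list)
--     movie_list = sorted(movie_list)
--     for i in range(l - 2):
--         for j in range(i + 1, l - 1):
--             if movie_list[j] in movie_dict:
--                 movie_dict[movie_list[j]] += 1
--             else:
--                 movie_dict[movie_list[j]] = 1
--         list.append([movie_list[i], movie_dict])
--         movie_dict = {}
--     return list
-- ===== SOURCE B (Python) =====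
-- def map1(movie_list):
--     movie_list = sorted(map(int, movie_list))
--     l = len(movie_list)
--     counter = {}
--     for v in movie_list[1:l - 1]:
--         counter[v] = counter.get(v, 0) + 1
--     result = []
--     for i in range(l - 2):
--         result.append([movie_list[i], dict(counter)])
--         nxt = movie_list[i + 1]
--         c = counter[nxt] - 1
--         if c == 0:
--             del counter[nxt]
--         else:
--             counter[nxt] = c
--     return result
-- ===== Notes on version B (the rewrite author's own statement) =====
-- stated objective: faster
-- what changed: Instead of rebuilding each suffix's count dict from scratch with a nested loop, B builds one count dict over positions 1..l-2 of the sorted list and maintains it incrementally (snapshot, then decrement/delete the next element) in a single pass.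
import Mathlib
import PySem

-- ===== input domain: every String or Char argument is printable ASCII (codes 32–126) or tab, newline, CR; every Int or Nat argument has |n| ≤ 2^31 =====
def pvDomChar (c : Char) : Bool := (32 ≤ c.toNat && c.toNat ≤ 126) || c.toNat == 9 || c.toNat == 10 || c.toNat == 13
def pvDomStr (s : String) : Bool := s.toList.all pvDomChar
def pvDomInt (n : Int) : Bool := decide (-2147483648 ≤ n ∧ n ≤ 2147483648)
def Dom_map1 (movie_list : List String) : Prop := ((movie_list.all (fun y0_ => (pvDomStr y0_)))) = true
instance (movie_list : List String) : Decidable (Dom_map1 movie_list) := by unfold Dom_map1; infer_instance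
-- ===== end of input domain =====

-- B replaces A's nested per-index recount of the suffix with one count dict maintained
-- incrementally across a single pass (same return value; neither program mutates its argument).

-- ===== PORT A =====
def map1 (movie_list : List String) : List (Int × (List (Int × Int))) :=
  let l : Int := movie_list.length
  let ml : List Int :=
    PySem.List.sorted (movie_list.map (fun s => (PySem.Int.ofStr? s).getD 0)) (fun x => x) false
  ((PySem.List.pyRange 0 (l - 2) 1).foldl (fun (acc : List (Int × (List (Int × Int)))) i =>
      let d := (PySem.List.pyRange (i + 1) (l - 1) 1).foldl
          (fun (d : PySem.Dict Int Int) j =>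
            let v := PySem.List.pyGetD ml j 0
            if d.contains v then d.modify v 0 (· + 1) else d.insert v 1)
          PySem.Dict.empty
      acc ++ [(PySem.List.pyGetD ml i 0, d.items)]) [])

-- ===== PORT B =====
def map1_alt (movie_list : List String) : List (Int × (List (Int × Int))) :=
  let ml : List Int :=
    PySem.List.sorted (movie_list.map (fun s => (PySem.Int.ofStr? s).getD 0)) (fun x => x) false
  let l : Int := ml.length
  let counter0 : PySem.Dict Int Int :=
    (PySem.List.slice ml (some 1) (some (l - 1))).foldl
      (fun d v => d.insert v (d.getD v 0 + 1)) PySem.Dict.empty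
  ((PySem.List.pyRange 0 (l - 2) 1).foldl
      (fun (st : List (Int × (List (Int × Int))) × PySem.Dict Int Int) i =>
        let res := st.1 ++ [(PySem.List.pyGetD ml i 0, st.2.items)]
        let nxt := PySem.List.pyGetD ml (i + 1) 0
        let c := st.2.getD nxt 0 - 1
        (res, if c == 0 then st.2.erase nxt else st.2.insert nxt c))
      ([], counter0)).1

-- ===== PRECONDITION & SPEC =====
-- Pre_ excludes exactly the inputs on which A's map(int, …) raises ValueError (a string that
-- is not a valid Python int literal); B raises there too.
def Pre_map1 (movie_list : List String) : Prop :=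
  ∀ s ∈ movie_list, (PySem.Int.ofStr? s).isSome
instance (movie_list : List String) : Decidable (Pre_map1 movie_list) := by
  unfold Pre_map1; infer_instance
def pvWitness_map1 : List String := ["3", "1", "2", "1"]
def Spec_map1 (movie_list : List String) (out : List (Int × (List (Int × Int)))) : Prop := out = map1_alt movie_list
instance (movie_list : List String) (out : List (Int × (List (Int × Int)))) : Decidable (Spec_map1 movie_list out) := by unfold Spec_map1; infer_instance

-- ===== CLAIM (what is proved, stated in full; the proofs are below) =====
def Claim_equal_map1 : Prop := ∀ (movie_list : List String), Dom_map1 movie_list → Pre_map1 movie_list → Spec_map1 movie_list (map1 movie_list)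

-- ===== LEMMAS AND PROOFS =====

-- the segment of s holding positions a, a+1, …, b-1
def seg (s : List Int) (a b : Nat) : List Int := (s.take b).drop a

-- the common closed form both ports are reduced to
def rows (s : List Int) : List (Int × (List (Int × Int))) :=
  (List.range (s.length - 2)).map
    (fun i => (s.getD i 0, (PySem.Dict.counter (seg s (i + 1) (s.length - 1))).items))

theorem dict_ext {κ ν : Type} (d e : PySem.Dict κ ν) (h : d.items = e.items) : d = e := by
  cases d; cases e; simpa using h

theorem step_eq (d : PySem.Dict Int Int) (v : Int) :
    (if d.contains v then d.modify v 0 (· + 1) else d.insert v 1)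
      = d.insert v (d.getD v 0 + 1) := by
  cases h : d.contains v with
  | true => simp [PySem.Dict.modify]
  | false => rw [PySem.Dict.getD_of_not_contains d 0 h]; simp

theorem seg_append (s : List Int) (a b : Nat) (hab : a ≤ b) (hb : b < s.length) :
    seg s a (b + 1) = seg s a b ++ [s.getD b 0] := by
  unfold seg
  rw [List.take_add_one, List.getElem?_eq_getElem hb]
  rw [List.drop_append_of_le_length (by simp [List.length_take]; omega)]
  simp [List.getD_eq_getElem?_getD, List.getElem?_eq_getElem hb]

theorem seg_nil (s : List Int) (a b : Nat) (hab : b ≤ a) : seg s a b = [] := by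
  unfold seg
  apply List.drop_eq_nil_of_le
  simp [List.length_take]; omega

theorem seg_cons (s : List Int) (a b : Nat) (hab : a < b) (hb : b ≤ s.length) :
    seg s a b = s.getD a 0 :: seg s (a + 1) b := by
  unfold seg
  have ha : a < (s.take b).length := by simp [List.length_take]; omega
  rw [List.drop_eq_getElem_cons ha]
  congr 1
  rw [List.getElem_take]
  simp [List.getD_eq_getElem?_getD, List.getElem?_eq_getElem (by omega : a < s.length)]

theorem seg_pairwise (s : List Int) (a b : Nat) (hp : s.Pairwise (· ≤ ·)) :
    (seg s a b).Pairwise (· ≤ ·) :=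
  hp.sublist ((List.drop_sublist _ _).trans (List.take_sublist _ _))

theorem foldl_idx {β : Type} (s : List Int) (g : β → Int → β) (a b : Nat)
    (hb : b ≤ s.length) (init : β) :
    (PySem.List.pyRange (a : Int) (b : Int)).foldl
        (fun acc j => g acc (PySem.List.pyGetD s j 0)) init
      = (seg s a b).foldl g init := by
  induction b generalizing init with
  | zero =>
      rw [PySem.List.pyRange_one_eq_nil (by exact_mod_cast Nat.zero_le a), seg_nil s a 0 (Nat.zero_le a)]
      rfl
  | succ b ih =>
      by_cases hab : a ≤ b
      · have hcast : ((b + 1 : Nat) : Int) = (b : Int) + 1 := by push_cast; ring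
        rw [hcast, PySem.List.pyRange_one_succ_right (by exact_mod_cast hab), List.foldl_append,
            ih (by omega), seg_append s a b hab (by omega), List.foldl_append]
        simp [PySem.List.pyGetD_natCast]
      · rw [PySem.List.pyRange_one_eq_nil (by exact_mod_cast (by omega : b + 1 ≤ a)),
            seg_nil s a (b + 1) (by omega)]
        rfl

theorem inner_eq (s : List Int) (a b : Nat) (hb : b ≤ s.length) :
    (PySem.List.pyRange (a : Int) (b : Int)).foldl
        (fun (d : PySem.Dict Int Int) j =>
          if d.contains (PySem.List.pyGetD s j 0)
          then d.modify (PySem.List.pyGetD s j 0) 0 (· + 1)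
          else d.insert (PySem.List.pyGetD s j 0) 1) PySem.Dict.empty
      = PySem.Dict.counter (seg s a b) := by
  have hfun : (fun (d : PySem.Dict Int Int) (j : Int) =>
        if d.contains (PySem.List.pyGetD s j 0)
        then d.modify (PySem.List.pyGetD s j 0) 0 (· + 1)
        else d.insert (PySem.List.pyGetD s j 0) 1)
      = (fun (d : PySem.Dict Int Int) (j : Int) =>
          d.insert (PySem.List.pyGetD s j 0) (d.getD (PySem.List.pyGetD s j 0) 0 + 1)) := by
    funext d j; exact step_eq d _
  rw [hfun]
  have h2 := foldl_idx s (fun (d : PySem.Dict Int Int) v => d.insert v (d.getD v 0 + 1)) a b hb PySem.Dict.empty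
  exact h2.trans (by rw [PySem.Dict.foldl_insert_getD_add_one_eq_counter])

theorem discard_ofList_cons (x : Int) (xs : List Int) :
    (PySem.Set.ofList (x :: xs)).discard x = (PySem.Set.ofList xs).discard x := by
  rw [PySem.Set.ofList_cons]
  simp [PySem.Set.discard, List.filter_filter]

theorem dec_counter (x : Int) (rest : List Int)
    (hle : ∀ y ∈ rest, x ≤ y) (hp : rest.Pairwise (· ≤ ·)) :
    (if ((PySem.Dict.counter (x :: rest)).getD x 0 - 1) == 0
     then (PySem.Dict.counter (x :: rest)).erase x
     else (PySem.Dict.counter (x :: rest)).insert x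
            ((PySem.Dict.counter (x :: rest)).getD x 0 - 1))
      = PySem.Dict.counter rest := by
  rw [PySem.Dict.getD_counter]
  by_cases hx : x ∈ rest
  · obtain ⟨rest', rfl⟩ : ∃ rest', rest = x :: rest' := by
      cases rest with
      | nil => simp at hx
      | cons a t =>
        have h1 : x ≤ a := hle a List.mem_cons_self
        rcases List.mem_cons.mp hx with h | h
        · exact ⟨t, by rw [h]⟩
        · have h2 := (List.pairwise_cons.mp hp).1 x h
          have : a = x := le_antisymm h2 h1
          exact ⟨t, by rw [this]⟩
    have hcond : ((↑(List.count x (x :: x :: rest')) - 1 : Int) == 0) = false := by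
      simp only [beq_eq_false_iff_ne, ne_eq, List.count_cons_self]
      push_cast; omega
    rw [hcond]
    simp only [Bool.false_eq_true, if_false]
    apply dict_ext
    have hcontains : (PySem.Dict.counter (x :: x :: rest')).contains x = true := by
      rw [PySem.Dict.contains_counter]; simp
    rw [PySem.Dict.items_insert_of_contains _ _ hcontains,
        PySem.Dict.items_counter, PySem.Dict.items_counter]
    have hof : PySem.Set.ofList (x :: x :: rest') = PySem.Set.ofList (x :: rest') := by
      rw [PySem.Set.ofList_cons, discard_ofList_cons, ← PySem.Set.ofList_cons]
    rw [hof, List.map_map]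
    apply List.map_congr_left
    intro k hk
    by_cases hkx : k = x
    · subst hkx
      simp only [Function.comp, beq_self_eq_true, if_true, List.count_cons_self,
        Prod.mk.injEq, true_and]
      push_cast; ring
    · have hbeq : (k == x) = false := by simp [hkx]
      simp only [Function.comp, hbeq, Bool.false_eq_true, if_false, Prod.mk.injEq, true_and]
      have : List.count k (x :: x :: rest') = List.count k rest' := by
        simp [Ne.symm hkx]
      rw [this]
      simp [Ne.symm hkx]
  · have h0 : List.count x rest = 0 := List.count_eq_zero.mpr hx
    have hcond : ((↑(List.count x (x :: rest)) - 1 : Int) == 0) = true := by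
      simp [List.count_cons_self, h0]
    rw [hcond, if_pos rfl]
    apply dict_ext
    simp only [PySem.Dict.erase]
    rw [PySem.Dict.items_counter, PySem.Dict.items_counter, PySem.Set.ofList_cons,
        List.filter_map]
    have hxof : x ∉ PySem.Set.ofList rest := fun h => hx ((PySem.Set.mem_ofList rest x).mp h)
    have hdisc : List.filter (fun y => !(y == x)) (PySem.Set.ofList rest) = PySem.Set.ofList rest :=
      List.filter_eq_self.mpr (fun a ha => by
        simp only [Bool.not_eq_true', beq_eq_false_iff_ne, ne_eq]
        exact fun hax => hxof (hax ▸ ha))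
    have hcomp : ((fun (p : Int × Int) => !(p.1 == x)) ∘ (fun k => (k, (List.count k (x :: rest) : Int))))
        = fun k => !(k == x) := by
      funext k; rfl
    rw [hcomp, List.filter_cons_of_neg (by simp)]
    show List.map _ (List.filter (fun y => !(y == x)) ((PySem.Set.ofList rest).discard x)) = _
    simp only [PySem.Set.discard, List.filter_filter]
    have hff : (fun y => !(y == x) && !(y == x)) = fun y => !(y == x) := by
      funext y; cases y == x <;> rfl
    rw [hff, hdisc]
    apply List.map_congr_left
    intro k hk
    have hkx : k ≠ x := fun h => hxof (h ▸ hk)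
    have : List.count k (x :: rest) = List.count k rest := by
      simp [Ne.symm hkx]
    rw [this]

theorem clamp_one (n : Nat) (hn : 1 ≤ n) : PySem.List.clampIdx n 1 = 1 := by
  unfold PySem.List.clampIdx; simp; omega

theorem clamp_pred (n : Nat) : PySem.List.clampIdx n ((n : Int) - 1) = n - 1 := by
  unfold PySem.List.clampIdx
  by_cases h : (n : Int) - 1 < 0
  · simp only [if_pos h]; split <;> omega
  · simp only [if_neg h]; omega

theorem slice_eq_seg (s : List Int) :
    PySem.List.slice s (some 1) (some ((s.length : Int) - 1)) = seg s 1 (s.length - 1) := by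
  by_cases hn : 1 ≤ s.length
  · simp only [PySem.List.slice, clamp_one s.length hn, clamp_pred s.length, seg, List.drop_take]
  · have : s = [] := by cases s <;> simp_all
    subst this; rfl

theorem B_inv (s : List Int) (hp : s.Pairwise (· ≤ ·)) (k : Nat) (hk : k ≤ s.length - 2) :
    (List.range k).foldl
        (fun (st : List (Int × (List (Int × Int))) × PySem.Dict Int Int) (i : Nat) =>
          (st.1 ++ [(s.getD i 0, st.2.items)],
           if (st.2.getD (s.getD (i + 1) 0) 0 - 1) == 0
           then st.2.erase (s.getD (i + 1) 0)
           else st.2.insert (s.getD (i + 1) 0) (st.2.getD (s.getD (i + 1) 0) 0 - 1)))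
        ([], PySem.Dict.counter (seg s 1 (s.length - 1)))
      = ((List.range k).map
          (fun i => (s.getD i 0, (PySem.Dict.counter (seg s (i + 1) (s.length - 1))).items)),
         PySem.Dict.counter (seg s (k + 1) (s.length - 1))) := by
  induction k with
  | zero => simp
  | succ k ih =>
      have hk' : k ≤ s.length - 2 := by omega
      rw [List.range_succ, List.foldl_append, List.map_append, ih hk']
      have hcons : seg s (k + 1) (s.length - 1) = s.getD (k + 1) 0 :: seg s (k + 2) (s.length - 1) := by
        have h := seg_cons s (k + 1) (s.length - 1) (by omega) (by omega)
        simpa using h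
      have hpseg := seg_pairwise s (k + 1) (s.length - 1) hp
      rw [hcons] at hpseg
      obtain ⟨hle, hptail⟩ := List.pairwise_cons.mp hpseg
      simp only [List.foldl_cons, List.foldl_nil, List.map_cons, List.map_nil]
      refine Prod.ext rfl ?_
      simp only
      rw [hcons]
      exact dec_counter _ _ hle hptail

theorem rowsA_eq (movie_list : List String) :
    map1 movie_list =
      rows (PySem.List.sorted (movie_list.map (fun s => (PySem.Int.ofStr? s).getD 0)) (fun x => x) false) := by
  set ml := PySem.List.sorted (movie_list.map (fun s => (PySem.Int.ofStr? s).getD 0)) (fun x => x) false with hml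
  have hlen : movie_list.length = ml.length := by
    rw [hml, PySem.List.length_sorted, List.length_map]
  simp only [map1, hlen]
  rw [PySem.List.foldl_append_singleton_eq_map, PySem.List.pyRange_one, List.map_map]
  have htn : ((ml.length : Int) - 2 - 0).toNat = ml.length - 2 := by omega
  rw [htn]
  unfold rows
  apply List.map_congr_left
  intro i hi
  have hi' : i < ml.length - 2 := List.mem_range.mp hi
  have h1 : ((0 : Int) + (i : Int)) = ((i : Nat) : Int) := by ring
  have h2 : ((i : Int) + 1) = (((i + 1 : Nat)) : Int) := by push_cast; ring
  have h3 : ((ml.length : Int) - 1) = (((ml.length - 1 : Nat)) : Int) := by omega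
  simp only [Function.comp, h1, h2, h3, ← hml]
  rw [inner_eq ml (i + 1) (ml.length - 1) (by omega)]
  simp [PySem.List.pyGetD_natCast]

theorem rowsB_eq (movie_list : List String) :
    map1_alt movie_list =
      rows (PySem.List.sorted (movie_list.map (fun s => (PySem.Int.ofStr? s).getD 0)) (fun x => x) false) := by
  set ml := PySem.List.sorted (movie_list.map (fun s => (PySem.Int.ofStr? s).getD 0)) (fun x => x) false with hml
  have hp : ml.Pairwise (· ≤ ·) := by
    have := PySem.List.sorted_pairwise (movie_list.map (fun s => (PySem.Int.ofStr? s).getD 0)) (fun x => x)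
    simpa [← hml] using this
  simp only [map1_alt, ← hml]
  rw [PySem.Dict.foldl_insert_getD_add_one_eq_counter, slice_eq_seg,
      PySem.List.pyRange_one, List.foldl_map]
  have htn : ((ml.length : Int) - 2 - 0).toNat = ml.length - 2 := by omega
  rw [htn]
  simp only [zero_add, ← Nat.cast_add_one, PySem.List.pyGetD_natCast]
  rw [B_inv ml hp (ml.length - 2) le_rfl]
  rfl

-- ===== VERDICT (by name: the statement is the Claim_ definition above) =====
theorem map1_spec : Claim_equal_map1 := by
  intro xs _ _
  unfold Spec_map1
  rw [rowsA_eq, rowsB_eq]
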